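-- pv_equiv track=rewrite | github.com/cancerit/pygas | pygas/classes.py | _opt_to_md
-- ===== SOURCE A (Python) =====
-- from typing import List
--
-- def _opt_to_md(md_ops: List[str]) -> str:
--     md_clean = [md_ops[0]]
--     for i in range(1, len(md_ops)):
--         op = md_ops[i]
--         # match, numeric
--         if op == "M":
--             if md_clean[-1].startswith("M"):
--                 md_clean[-1] += op
--             else:
--                 md_clean.append(op)
--             continue
--         # deletions
--         if op.islower():
--             if md_clean[-1].islower():
--                 md_clean.append(op)
--             else:
--                 md_clean.extend(["^", op])
--             continue
--         # mismatch
--         md_clean.append(op)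
--
--     md_str = ""
--     for i, mde in enumerate(md_clean):
--         if mde.startswith("M"):
--             md_str += str(len(mde))
--             continue
--         if mde == "^":
--             md_str += mde
--             continue
--         if mde.isupper():
--             if i > 0 and md_clean[i - 1].islower():
--                 md_str += "0"
--             md_str += mde
--         else:
--             # inverse of preceding block is not relevant as rules of scoring will never allow del/ins to precede a
--             # mismatch as when tracing back the mismatch has a lower penalty, always get "--m"
--             md_str += mde.upper()
--     return md_str
-- ===== SOURCE B (Python) =====
-- from typing import List
--
-- def _opt_to_md(md_ops: List[str]) -> str:
--     # single pass: keep an integer length of the open match-run instead of a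
--     # growing "MMM.." token, and emit each finished token directly
--     parts: List[str] = []
--     run = 0            # length of the open match-run token (0 = none open)
--     prev_lower = False # whether the last emitted token is lowercase
--     first = True       # the leading op is emitted raw (no '^', no '0')
--     for op in md_ops:
--         if not first and op == "M":
--             run += 1
--         elif not first and op.islower():
--             if run:
--                 parts.append(str(run))
--                 run = 0
--                 prev_lower = False
--             if not prev_lower:
--                 parts.append("^")
--             parts.append(op.upper())
--             prev_lower = True
--         else:
--             if run:
--                 parts.append(str(run))
--                 run = 0
--                 prev_lower = False
--             if op.startswith("M"):
--                 run = len(op)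
--             elif op.isupper():
--                 parts.append(("0" if prev_lower else "") + op)
--                 prev_lower = False
--             else:
--                 parts.append(op.upper())
--                 prev_lower = op.islower()
--         first = False
--     if run:
--         parts.append(str(run))
--     return "".join(parts)
-- ===== Notes on version B (the rewrite author's own statement) =====
-- stated objective: faster
-- what changed: Replaces A's two passes (build an intermediate token list with in-place 'M'-concatenation and negative-index lookback, then re-scan it with enumerate and index-(i-1) lookups) by one direct pass that keeps the open match-run as an integer counter and a prev-token-lowercase flag and emits each finished MD token immediately (no intermediate list, no repeated string concatenation).
import Mathlib
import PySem

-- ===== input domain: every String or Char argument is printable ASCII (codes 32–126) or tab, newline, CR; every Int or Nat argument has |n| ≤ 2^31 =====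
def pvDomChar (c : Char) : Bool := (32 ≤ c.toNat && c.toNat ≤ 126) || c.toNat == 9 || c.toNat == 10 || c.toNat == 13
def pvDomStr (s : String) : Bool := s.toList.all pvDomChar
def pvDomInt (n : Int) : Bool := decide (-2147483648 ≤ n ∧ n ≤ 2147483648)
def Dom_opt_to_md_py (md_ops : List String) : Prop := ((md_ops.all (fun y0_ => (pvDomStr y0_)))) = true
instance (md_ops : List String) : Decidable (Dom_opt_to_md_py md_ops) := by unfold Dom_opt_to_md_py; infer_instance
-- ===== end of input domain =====

-- B replaces A's two passes (intermediate token list, then a re-scan with index lookback) by one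
-- direct pass keeping the open match-run as a counter; same return value on every non-empty input.

-- Python str.islower / str.isupper, exact on the ASCII domain (cased characters = letters):
def pvIslower (cs : List Char) : Bool :=
  cs.any PySem.Chars.isalpha && cs.all (fun c => !(PySem.Chars.isupper c))
def pvIsupper (cs : List Char) : Bool :=
  cs.any PySem.Chars.isalpha && cs.all (fun c => !(PySem.Chars.islower c))

-- ===== PORT A =====
-- one iteration of A's first loop (md_clean[-1] += op modelled as dropLast ++ [last ++ op])
def opt_to_md_step (md_clean : List (List Char)) (op : List Char) : List (List Char) :=
  let last := (PySem.List.pyGet? md_clean (-1)).getD []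
  if op = ['M'] then
    if PySem.Chars.startswith last ['M'] then md_clean.dropLast ++ [last ++ op]
    else md_clean ++ [op]
  else if pvIslower op = true then
    if pvIslower last = true then md_clean ++ [op]
    else md_clean ++ [['^'], op]
  else md_clean ++ [op]

-- A's second loop: for i, mde in enumerate(md_clean): …
def opt_to_md_render (md_clean : List (List Char)) : List Char :=
  (PySem.List.enumerate md_clean 0).foldl
    (fun md_str p =>
      if PySem.Chars.startswith p.2 ['M'] then md_str ++ PySem.Int.toChars (p.2.length : Int)
      else if p.2 = ['^'] then md_str ++ p.2
      else if pvIsupper p.2 = true then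
        (if p.1 > 0 ∧ pvIslower ((PySem.List.pyGet? md_clean (p.1 - 1)).getD []) = true
         then md_str ++ ['0'] else md_str) ++ p.2
      else md_str ++ PySem.Chars.upper p.2) []

def opt_to_md_py (md_ops : List String) : String :=
  match md_ops with
  | [] => ""  -- Python raises IndexError on md_ops[0]; excluded by Pre_
  | s0 :: rest => String.ofList (opt_to_md_render ((rest.map (fun s => s.toList)).foldl opt_to_md_step [s0.toList]))

-- ===== PORT B =====
-- state: (parts, run, prev_lower, first)
def opt_to_md_alt_step (st : List (List Char) × Nat × Bool × Bool) (op : List Char) :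
    List (List Char) × Nat × Bool × Bool :=
  let parts := st.1; let run := st.2.1; let prevLower := st.2.2.1; let first := st.2.2.2
  if first = false ∧ op = ['M'] then (parts, run + 1, prevLower, false)
  else if first = false ∧ pvIslower op = true then
    let parts := if run > 0 then parts ++ [PySem.Int.toChars (run : Int)] else parts
    let prevLower := if run > 0 then false else prevLower
    let parts := if prevLower then parts else parts ++ [['^']]
    (parts ++ [PySem.Chars.upper op], 0, true, false)
  else
    let parts := if run > 0 then parts ++ [PySem.Int.toChars (run : Int)] else parts
    let prevLower := if run > 0 then false else prevLower
    if PySem.Chars.startswith op ['M'] then (parts, op.length, prevLower, false)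
    else if pvIsupper op = true then (parts ++ [(if prevLower then ['0'] else []) ++ op], 0, false, false)
    else (parts ++ [PySem.Chars.upper op], 0, pvIslower op, false)

def opt_to_md_py_alt (md_ops : List String) : String :=
  let st := (md_ops.map (fun s => s.toList)).foldl opt_to_md_alt_step ([], 0, false, true)
  String.ofList (PySem.Chars.join [] (if st.2.1 > 0 then st.1 ++ [PySem.Int.toChars (st.2.1 : Int)] else st.1))

-- ===== PRECONDITION & SPEC =====
-- Pre_ excludes only the empty list, on which Python A raises IndexError (md_ops[0]).
def Pre_opt_to_md_py (md_ops : List String) : Prop := md_ops ≠ []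
instance (md_ops : List String) : Decidable (Pre_opt_to_md_py md_ops) := by
  unfold Pre_opt_to_md_py; infer_instance
def pvWitness_opt_to_md_py : List String := ["M", "a", "T", "M"]

def Spec_opt_to_md_py (md_ops : List String) (out : String) : Prop := out = opt_to_md_py_alt md_ops
instance (md_ops : List String) (out : String) : Decidable (Spec_opt_to_md_py md_ops out) := by
  unfold Spec_opt_to_md_py; infer_instance

-- ===== CLAIM (what is proved, stated in full; the proofs are below) =====
def Claim_equal_opt_to_md_py : Prop := ∀ (md_ops : List String), Dom_opt_to_md_py md_ops →
  Pre_opt_to_md_py md_ops → Spec_opt_to_md_py md_ops (opt_to_md_py md_ops)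

-- ===== LEMMAS AND PROOFS =====

def rendTok (pl : Bool) (t : List Char) : List Char :=
  if PySem.Chars.startswith t ['M'] then PySem.Int.toChars (t.length : Int)
  else if t = ['^'] then t
  else if pvIsupper t = true then (if pl then ['0'] else []) ++ t
  else PySem.Chars.upper t

def rendAll (pl : Bool) : List (List Char) → List Char
  | [] => []
  | t :: ts => rendTok pl t ++ rendAll (pvIslower t) ts

def lastLower (pl : Bool) (xs : List (List Char)) : Bool :=
  match xs.getLast? with
  | some t => pvIslower t
  | none => pl

theorem pv_lastLower_cons (pl : Bool) (x : List Char) (xs : List (List Char)) :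
    lastLower pl (x :: xs) = lastLower (pvIslower x) xs := by
  cases hx : xs.getLast? with
  | none => rw [List.getLast?_eq_none_iff] at hx; subst hx; simp [lastLower]
  | some t => cases xs with
    | nil => simp at hx
    | cons y ys => simp [lastLower, hx, List.getLast?_cons_cons]

theorem pv_lastLower_concat (pl : Bool) (xs : List (List Char)) (x : List Char) :
    lastLower pl (xs ++ [x]) = pvIslower x := by
  simp [lastLower]

theorem pv_rendAll_append (pl : Bool) (xs : List (List Char)) (t : List Char) :
    rendAll pl (xs ++ [t]) = rendAll pl xs ++ rendTok (lastLower pl xs) t := by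
  induction xs generalizing pl with
  | nil => simp [rendAll, lastLower]
  | cons x xs ih => simp [rendAll, ih, pv_lastLower_cons]

theorem pv_rendTok_caret (pl : Bool) : rendTok pl ['^'] = ['^'] := by
  cases pl <;> rfl

theorem pv_startswith_appendM (t : List Char) (h : PySem.Chars.startswith t ['M'] = true) :
    PySem.Chars.startswith (t ++ ['M']) ['M'] = true := by
  rw [PySem.Chars.startswith_iff] at h ⊢
  exact h.trans (List.prefix_append _ _)

theorem pv_startswith_ne_nil (t : List Char) (h : PySem.Chars.startswith t ['M'] = true) :
    0 < t.length := by
  rw [PySem.Chars.startswith_iff] at h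
  obtain ⟨r, rfl⟩ := h
  simp

theorem pv_startswithM_not_lower (t : List Char)
    (h : PySem.Chars.startswith t ['M'] = true) : pvIslower t = false := by
  rw [PySem.Chars.startswith_iff] at h
  obtain ⟨r, rfl⟩ := h
  simp [pvIslower, PySem.Chars.isupper]

theorem pv_lower_not_startswithM (t : List Char) (h : pvIslower t = true) :
    PySem.Chars.startswith t ['M'] = false := by
  cases hs : PySem.Chars.startswith t ['M'] with
  | false => rfl
  | true => rw [pv_startswithM_not_lower t hs] at h; exact absurd h (by decide)

theorem pv_lower_not_upper (t : List Char) (h : pvIslower t = true) : pvIsupper t = false := by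
  simp only [pvIslower, Bool.and_eq_true, List.any_eq_true, List.all_eq_true] at h
  obtain ⟨⟨c, hc, hca⟩, hall⟩ := h
  have hup := hall c hc
  have hlo : PySem.Chars.islower c = true := by
    have ha : PySem.Chars.isalpha c = (PySem.Chars.islower c || PySem.Chars.isupper c) := by
      simp [PySem.Chars.isalpha, PySem.Chars.islower, PySem.Chars.isupper, Bool.or_comm]
    rw [Bool.not_eq_true'] at hup
    rw [ha] at hca
    simpa [hup] using hca
  rw [Bool.eq_false_iff]
  intro hcon
  simp only [pvIsupper, Bool.and_eq_true, List.any_eq_true, List.all_eq_true] at hcon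
  have := hcon.2 c hc
  simp [hlo] at this

theorem pv_upper_not_lower (t : List Char) (h : pvIsupper t = true) : pvIslower t = false := by
  cases hl : pvIslower t with
  | false => rfl
  | true => rw [pv_lower_not_upper t hl] at h; exact absurd h (by decide)

theorem pv_rendTok_lower (pl : Bool) (t : List Char) (h : pvIslower t = true) :
    rendTok pl t = PySem.Chars.upper t := by
  have h1 := pv_lower_not_startswithM t h
  have h2 := pv_lower_not_upper t h
  have h3 : t ≠ ['^'] := by intro hc; subst hc; exact absurd h (by decide)
  simp [rendTok, h1, h2, h3]

theorem pv_rendTok_M (pl : Bool) (t : List Char) (h : PySem.Chars.startswith t ['M'] = true) :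
    rendTok pl t = PySem.Int.toChars (t.length : Int) := by
  simp [rendTok, h]

theorem pv_rendTok_other (pl : Bool) (t : List Char)
    (h1 : PySem.Chars.startswith t ['M'] = false) (h2 : pvIsupper t = false) :
    rendTok pl t = PySem.Chars.upper t := by
  by_cases hc : t = ['^']
  · subst hc; exact pv_rendTok_caret pl
  · simp [rendTok, h1, h2, hc]

theorem pv_pyGet_last (xs : List (List Char)) (x : List Char) :
    PySem.List.pyGet? (xs ++ [x]) (-1) = some x := by
  simp [PySem.List.pyGet?, PySem.List.pyIdx?]

theorem pv_flatten_concat (ps : List (List Char)) (x : List Char) :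
    (ps ++ [x]).flatten = ps.flatten ++ x := by simp

theorem pv_join_nil_flatten (ps : List (List Char)) :
    PySem.Chars.join [] ps = ps.flatten := by
  induction ps with
  | nil => simp [PySem.Chars.join_nil]
  | cons a ps ih =>
    cases ps with
    | nil => simp [PySem.Chars.join_singleton]
    | cons b r => rw [PySem.Chars.join_cons_cons]; simp_all

theorem pv_render_go (clean pre cur : List (List Char)) (acc : List Char)
    (h : clean = pre ++ cur) :
    (PySem.List.enumerate cur (pre.length : Int)).foldl
      (fun md_str p =>
        if PySem.Chars.startswith p.2 ['M'] then md_str ++ PySem.Int.toChars (p.2.length : Int)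
        else if p.2 = ['^'] then md_str ++ p.2
        else if pvIsupper p.2 = true then
          (if p.1 > 0 ∧ pvIslower ((PySem.List.pyGet? clean (p.1 - 1)).getD []) = true
           then md_str ++ ['0'] else md_str) ++ p.2
        else md_str ++ PySem.Chars.upper p.2) acc
    = acc ++ rendAll (lastLower false pre) cur := by
  induction cur generalizing pre acc with
  | nil => simp [PySem.List.enumerate_nil, rendAll]
  | cons t ts ih =>
    rw [PySem.List.enumerate_cons, List.foldl_cons]
    have hcond : ((pre.length : Int) > 0 ∧
        pvIslower ((PySem.List.pyGet? clean ((pre.length : Int) - 1)).getD []) = true)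
        ↔ lastLower false pre = true := by
      rw [h]
      rcases List.eq_nil_or_concat pre with rfl | ⟨q, p, rfl⟩
      · simp [lastLower]
      · simp only [List.concat_eq_append]
        have hget : PySem.List.pyGet? ((q ++ [p]) ++ t :: ts)
            ((((q ++ [p]).length : Nat) : Int) - 1) = some p := by
          have h5 : ((((q ++ [p]).length : Nat)) : Int) - 1 = ((q.length : Nat) : Int) := by
            simp
          rw [h5, PySem.List.pyGet?_natCast, List.append_assoc,
            List.getElem?_append_right (le_refl _)]
          simp
        have hpos : (0 : Int) < (((q ++ [p]).length : Nat) : Int) := by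
          simp
        simp [pv_lastLower_concat]
    have hstep2 : (if PySem.Chars.startswith t ['M'] then acc ++ PySem.Int.toChars (t.length : Int)
        else if t = ['^'] then acc ++ t
        else if pvIsupper t = true then
          (if (pre.length : Int) > 0 ∧
              pvIslower ((PySem.List.pyGet? clean ((pre.length : Int) - 1)).getD []) = true
           then acc ++ ['0'] else acc) ++ t
        else acc ++ PySem.Chars.upper t) = acc ++ rendTok (lastLower false pre) t := by
      by_cases h1 : PySem.Chars.startswith t ['M'] = true
      · simp [rendTok, h1]
      · by_cases h2 : t = ['^']
        · subst h2; rw [pv_rendTok_caret]; simp [h1]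
        · by_cases h3 : pvIsupper t = true
          · rw [if_congr hcond rfl rfl]
            by_cases h4 : lastLower false pre = true
            · simp [rendTok, h1, h2, h3, h4]
            · simp [rendTok, h1, h2, h3, h4]
          · simp [rendTok, h1, h2, h3]
    have harith : ((pre.length : Nat) : Int) + 1 = (((pre ++ [t]).length : Nat) : Int) := by
      simp
    rw [harith, ih (pre ++ [t]) _ (by simp [h]), pv_lastLower_concat]
    show (if PySem.Chars.startswith t ['M'] then acc ++ PySem.Int.toChars (t.length : Int)
        else if t = ['^'] then acc ++ t
        else if pvIsupper t = true then
          (if (pre.length : Int) > 0 ∧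
              pvIslower ((PySem.List.pyGet? clean ((pre.length : Int) - 1)).getD []) = true
           then acc ++ ['0'] else acc) ++ t
        else acc ++ PySem.Chars.upper t) ++ rendAll (pvIslower t) ts
      = acc ++ rendAll (lastLower false pre) (t :: ts)
    rw [hstep2]
    simp [rendAll, List.append_assoc]

theorem pv_render_eq (clean : List (List Char)) :
    opt_to_md_render clean = rendAll false clean := by
  have := pv_render_go clean [] clean [] rfl
  simpa [opt_to_md_render, lastLower] using this

def pvInv (clean : List (List Char)) (st : List (List Char) × Nat × Bool × Bool) : Prop :=
  st.2.2.2 = false ∧ ∃ body last, clean = body ++ [last] ∧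
    (if st.2.1 > 0 then
       PySem.Chars.startswith last ['M'] = true ∧ last.length = st.2.1 ∧
       rendAll false body = st.1.flatten
     else
       PySem.Chars.startswith last ['M'] = false ∧ pvIslower last = st.2.2.1 ∧
       rendAll false clean = st.1.flatten)

theorem pv_init_inv (op0 : List Char) :
    pvInv [op0] (opt_to_md_alt_step ([], 0, false, true) op0) := by
  rw [opt_to_md_alt_step]
  simp only [if_neg (by simp : ¬((true : Bool) = false ∧ op0 = ['M'])),
    if_neg (by simp : ¬((true : Bool) = false ∧ pvIslower op0 = true)),
    gt_iff_lt, Nat.lt_irrefl, if_false, List.nil_append]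
  by_cases h1 : PySem.Chars.startswith op0 ['M'] = true
  · simp only [if_pos h1]
    refine ⟨rfl, [], op0, by simp, ?_⟩
    have := pv_startswith_ne_nil op0 h1
    simp [this, h1, rendAll]
  · simp only [Bool.not_eq_true] at h1
    simp only [h1, Bool.false_eq_true, if_false]
    by_cases h2 : pvIsupper op0 = true
    · simp only [if_pos h2]
      refine ⟨rfl, [], op0, by simp, ?_⟩
      have h3 : op0 ≠ ['^'] := by intro hc; subst hc; exact absurd h2 (by decide)
      simp [h1, pv_upper_not_lower op0 h2, rendAll, rendTok, h2, h3]
    · simp only [if_neg h2]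
      refine ⟨rfl, [], op0, by simp, ?_⟩
      simp [h1, rendAll, pv_rendTok_other false op0 h1 (by simpa using h2)]

theorem pv_step_inv (clean : List (List Char)) (st : List (List Char) × Nat × Bool × Bool)
    (op : List Char) (h : pvInv clean st) :
    pvInv (opt_to_md_step clean op) (opt_to_md_alt_step st op) := by
  obtain ⟨parts, run, prevLower, first⟩ := st
  obtain ⟨hfirst, body, last, rfl, hrest⟩ := h
  simp only at hfirst hrest
  subst hfirst
  simp only [opt_to_md_step, opt_to_md_alt_step, pv_pyGet_last, Option.getD_some]
  by_cases hM : op = ['M']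
  · subst hM
    rcases Nat.eq_zero_or_pos run with hrun | hrun
    · subst hrun
      simp only [gt_iff_lt, Nat.lt_irrefl, if_false] at hrest
      obtain ⟨hsw, hpl, hrend⟩ := hrest
      simp only [hsw, Bool.false_eq_true, if_false, if_true, and_self, eq_self_iff_true,
        and_true, true_and, if_pos]
      refine ⟨rfl, body ++ [last], ['M'], by simp, ?_⟩
      simp only [gt_iff_lt, Nat.zero_add, if_pos Nat.one_pos]
      exact ⟨by decide, by decide, hrend⟩
    · simp only [gt_iff_lt, if_pos hrun] at hrest
      obtain ⟨hsw, hlen, hrend⟩ := hrest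
      simp only [hsw, if_true, and_self, eq_self_iff_true, and_true, true_and, if_pos,
        List.dropLast_concat]
      refine ⟨rfl, body, last ++ ['M'], by simp, ?_⟩
      simp only [gt_iff_lt, if_pos (Nat.lt_of_lt_of_le hrun (Nat.le_succ run))]
      refine ⟨pv_startswith_appendM last hsw, ?_, hrend⟩
      simp [hlen]
  · by_cases hlw : pvIslower op = true
    · have hswop := pv_lower_not_startswithM op hlw
      rcases Nat.eq_zero_or_pos run with hrun | hrun
      · subst hrun
        simp only [gt_iff_lt, Nat.lt_irrefl, if_false] at hrest
        obtain ⟨hsw, hpl, hrend⟩ := hrest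
        cases hpv : prevLower with
        | true =>
          rw [hpv] at hpl
          simp only [hM, hlw, hpl, gt_iff_lt, Nat.lt_irrefl, if_false, if_true,
            eq_self_iff_true, and_true, true_and, and_false, false_and, if_pos]
          refine ⟨rfl, body ++ [last], op, by simp, ?_⟩
          simp only [gt_iff_lt, Nat.lt_irrefl, if_false]
          refine ⟨hswop, by simp [hlw], ?_⟩
          rw [pv_rendAll_append, pv_lastLower_concat, pv_rendTok_lower _ _ hlw, hrend,
            pv_flatten_concat]
        | false =>
          rw [hpv] at hpl
          simp only [hM, hlw, hpl, gt_iff_lt, Nat.lt_irrefl, if_false, if_true,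
            eq_self_iff_true, and_true, true_and, and_false, false_and, Bool.false_eq_true,
            if_pos]
          refine ⟨rfl, body ++ [last] ++ [['^']], op, by simp, ?_⟩
          simp only [gt_iff_lt, Nat.lt_irrefl, if_false]
          refine ⟨hswop, by simp [hlw], ?_⟩
          rw [show body ++ [last] ++ [['^'], op] = ((body ++ [last] ++ [['^']]) ++ [op]) by simp,
            pv_rendAll_append, pv_rendAll_append, pv_lastLower_concat, pv_lastLower_concat,
            pv_rendTok_lower _ _ hlw, hrend]
          simp [pv_rendTok_caret]
      · simp only [gt_iff_lt, if_pos hrun] at hrest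
        obtain ⟨hsw, hlen, hrend⟩ := hrest
        have hll : pvIslower last = false := pv_startswithM_not_lower last hsw
        simp only [hM, hlw, hll, hrun, gt_iff_lt, if_false, if_true, Bool.false_eq_true,
          eq_self_iff_true, and_true, true_and, and_false, false_and, if_pos]
        refine ⟨rfl, body ++ [last] ++ [['^']], op, by simp, ?_⟩
        simp only [gt_iff_lt, Nat.lt_irrefl, if_false]
        refine ⟨hswop, by simp [hlw], ?_⟩
        rw [show body ++ [last] ++ [['^'], op] = ((body ++ [last] ++ [['^']]) ++ [op]) by simp,
          pv_rendAll_append, pv_rendAll_append, pv_lastLower_concat, pv_lastLower_concat,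
          pv_rendAll_append, pv_rendTok_lower _ _ hlw, pv_rendTok_M _ _ hsw, hrend, hlen]
        simp [pv_rendTok_caret]
    · -- mismatch branch
      simp only [Bool.not_eq_true] at hlw
      have hA : (if op = ['M'] then
            (if PySem.Chars.startswith last ['M'] = true then
               (body ++ [last]).dropLast ++ [last ++ op]
             else body ++ [last] ++ [op])
          else if pvIslower op = true then
            (if pvIslower last = true then body ++ [last] ++ [op]
             else body ++ [last] ++ [['^'], op])
          else body ++ [last] ++ [op]) = body ++ [last] ++ [op] := by
        simp [hM, hlw]
      -- state after flush
      have key : ∀ parts1 prevLower1,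
          rendAll false (body ++ [last]) = parts1.flatten →
          lastLower false (body ++ [last]) = prevLower1 →
          pvInv (body ++ [last] ++ [op])
            (if PySem.Chars.startswith op ['M'] = true then (parts1, op.length, prevLower1, false)
             else if pvIsupper op = true then
               (parts1 ++ [(if prevLower1 = true then ['0'] else []) ++ op], 0, false, false)
             else (parts1 ++ [PySem.Chars.upper op], 0, pvIslower op, false)) := by
        intro parts1 prevLower1 hP hL
        by_cases hsm : PySem.Chars.startswith op ['M'] = true
        · simp only [if_pos hsm]
          refine ⟨rfl, body ++ [last], op, rfl, ?_⟩
          simp only [gt_iff_lt, if_pos (pv_startswith_ne_nil op hsm)]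
          exact ⟨hsm, by simp, hP⟩
        · simp only [Bool.not_eq_true] at hsm
          by_cases hup : pvIsupper op = true
          · simp only [hsm, Bool.false_eq_true, if_false, if_pos hup]
            refine ⟨rfl, body ++ [last], op, rfl, ?_⟩
            simp only [gt_iff_lt, Nat.lt_irrefl, if_false]
            refine ⟨hsm, by simp [pv_upper_not_lower op hup], ?_⟩
            rw [pv_rendAll_append, hP, hL, pv_flatten_concat]
            have hnc : op ≠ ['^'] := by intro hc; subst hc; exact absurd hup (by decide)
            simp [rendTok, hsm, hup, hnc]
          · simp only [hsm, Bool.false_eq_true, if_false, if_neg hup]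
            refine ⟨rfl, body ++ [last], op, rfl, ?_⟩
            simp only [gt_iff_lt, Nat.lt_irrefl, if_false]
            refine ⟨hsm, by simp [hlw], ?_⟩
            rw [pv_rendAll_append, hP, pv_flatten_concat,
              pv_rendTok_other _ _ hsm (by simpa using hup)]
      rcases Nat.eq_zero_or_pos run with hrun | hrun
      · subst hrun
        simp only [gt_iff_lt, Nat.lt_irrefl, if_false] at hrest
        obtain ⟨hsw, hpl, hrend⟩ := hrest
        rw [hA]
        simp only [hM, hlw, gt_iff_lt, Nat.lt_irrefl, if_false, Bool.false_eq_true,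
          and_false, false_and, if_neg (fun hc : False => hc)]
        have := key parts prevLower hrend (by rw [pv_lastLower_concat]; exact hpl)
        simpa [hlw] using this
      · simp only [gt_iff_lt, if_pos hrun] at hrest
        obtain ⟨hsw, hlen, hrend⟩ := hrest
        rw [hA]
        simp only [hM, hlw, hrun, gt_iff_lt, if_false, if_true, Bool.false_eq_true,
          and_false, false_and]
        have hP : rendAll false (body ++ [last]) = (parts ++ [PySem.Int.toChars (run : Int)]).flatten := by
          rw [pv_rendAll_append, hrend, pv_flatten_concat, pv_rendTok_M _ _ hsw, hlen]
        have hL : lastLower false (body ++ [last]) = false := by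
          rw [pv_lastLower_concat]; exact pv_startswithM_not_lower last hsw
        have := key (parts ++ [PySem.Int.toChars (run : Int)]) false hP hL
        simpa [hlw] using this

theorem pv_foldl_inv (ops : List (List Char)) (clean : List (List Char))
    (st : List (List Char) × Nat × Bool × Bool) (h : pvInv clean st) :
    pvInv (ops.foldl opt_to_md_step clean) (ops.foldl opt_to_md_alt_step st) := by
  induction ops generalizing clean st with
  | nil => exact h
  | cons o os ih => exact ih _ _ (pv_step_inv clean st o h)

theorem pv_final_eq (clean : List (List Char)) (st : List (List Char) × Nat × Bool × Bool)
    (h : pvInv clean st) :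
    rendAll false clean =
      (if st.2.1 > 0 then st.1 ++ [PySem.Int.toChars (st.2.1 : Int)] else st.1).flatten := by
  obtain ⟨parts, run, prevLower, first⟩ := st
  obtain ⟨hfirst, body, last, rfl, hrest⟩ := h
  rcases Nat.eq_zero_or_pos run with hrun | hrun
  · subst hrun
    simp only [gt_iff_lt, Nat.lt_irrefl, if_false] at hrest ⊢
    exact hrest.2.2
  · simp only [gt_iff_lt, if_pos hrun] at hrest ⊢
    obtain ⟨hsw, hlen, hrend⟩ := hrest
    rw [pv_rendAll_append, hrend, pv_rendTok_M _ _ hsw, hlen, pv_flatten_concat]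

-- ===== VERDICT (by name: the statement is the Claim_ definition above) =====
theorem opt_to_md_py_spec : Claim_equal_opt_to_md_py := by
  intro md_ops _ hpre
  unfold Spec_opt_to_md_py
  match md_ops with
  | [] => exact absurd rfl hpre
  | s0 :: rest =>
    show opt_to_md_py (s0 :: rest) = opt_to_md_py_alt (s0 :: rest)
    have hinv := pv_foldl_inv (rest.map (fun s => s.toList)) [s0.toList]
      (opt_to_md_alt_step ([], 0, false, true) s0.toList) (pv_init_inv s0.toList)
    have hfin := pv_final_eq _ _ hinv
    simp only [opt_to_md_py, opt_to_md_py_alt, List.map_cons, List.foldl_cons]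
    rw [pv_render_eq, pv_join_nil_flatten, hfin]
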